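-- pv_equiv track=rewrite | github.com/arxanas/advent-of-code | year2021/day22/__init__.py | cut_ranges
-- ===== SOURCE A (Python) =====
-- def cut_ranges(r11, r12, r21, r22):
--     rs = []
--     assert r11 <= r12
--     assert r21 <= r22
--     points = sorted([r11, r12, r21, r22])
--     for (l, r) in zip(points, points[1:]):
--         rs.append((l, r))
--     return sorted(set((a, b) for (a, b) in rs if r11 <= a < b <= r12))
-- ===== SOURCE B (Python) =====
-- def cut_ranges(r11, r12, r21, r22):
--     assert r11 <= r12
--     assert r21 <= r22
--     a = min(max(r21, r11), r12)
--     b = min(max(r22, r11), r12)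
--     return [(l, r) for (l, r) in ((r11, a), (a, b), (b, r12)) if l < r]
-- ===== Notes on version B (the rewrite author's own statement) =====
-- stated objective: simpler
-- what changed: B clamps the second range's endpoints into the first and emits the three candidate segments directly, with no sorting of the four points, no zip over adjacent pairs, no set deduplication and no final sort.
import Mathlib
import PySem

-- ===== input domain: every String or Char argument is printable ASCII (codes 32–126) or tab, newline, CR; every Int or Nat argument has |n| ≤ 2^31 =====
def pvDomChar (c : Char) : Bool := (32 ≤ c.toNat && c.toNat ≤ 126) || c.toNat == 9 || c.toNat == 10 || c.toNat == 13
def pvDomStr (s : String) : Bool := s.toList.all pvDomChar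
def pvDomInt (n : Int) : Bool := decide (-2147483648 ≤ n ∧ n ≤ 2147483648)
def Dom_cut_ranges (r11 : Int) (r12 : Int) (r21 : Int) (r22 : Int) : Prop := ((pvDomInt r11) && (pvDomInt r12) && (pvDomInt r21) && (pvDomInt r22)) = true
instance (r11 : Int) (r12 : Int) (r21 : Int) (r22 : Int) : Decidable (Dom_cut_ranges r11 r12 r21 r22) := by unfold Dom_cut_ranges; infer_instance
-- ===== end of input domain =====

-- B replaces A's sort-the-four-points + zip-adjacent-pairs + set + final sort by directly
-- clamping the second range's endpoints into the first and filtering three candidate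
-- segments (objective: simpler).


-- ===== PORT A =====
-- points[1:] is points.tail; 'rs.append((l, r))' is the foldl appending the zip element.
def cut_ranges (r11 : Int) (r12 : Int) (r21 : Int) (r22 : Int) : List (Int × Int) :=
  let rs : List (Int × Int) := []
  let points := PySem.List.sorted [r11, r12, r21, r22] (fun x => x) false
  let rs := (points.zip points.tail).foldl (fun acc lr => acc ++ [lr]) rs
  PySem.List.sorted2
    (PySem.Set.ofList (rs.filter (fun ab => decide (r11 ≤ ab.1 ∧ ab.1 < ab.2 ∧ ab.2 ≤ r12))))
    Prod.fst Prod.snd false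

-- ===== PORT B =====
def cut_ranges_alt (r11 : Int) (r12 : Int) (r21 : Int) (r22 : Int) : List (Int × Int) :=
  let a := min (max r21 r11) r12
  let b := min (max r22 r11) r12
  [(r11, a), (a, b), (b, r12)].filter (fun lr => decide (lr.1 < lr.2))

-- ===== PRECONDITION & SPEC =====
-- Pre_ excludes exactly the inputs on which A's two asserts raise AssertionError.
def Pre_cut_ranges (r11 : Int) (r12 : Int) (r21 : Int) (r22 : Int) : Prop :=
  r11 ≤ r12 ∧ r21 ≤ r22
instance (r11 : Int) (r12 : Int) (r21 : Int) (r22 : Int) : Decidable (Pre_cut_ranges r11 r12 r21 r22) := by unfold Pre_cut_ranges; infer_instance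
def pvWitness_cut_ranges : Int × Int × Int × Int := (0, 10, 3, 5)
def Spec_cut_ranges (r11 : Int) (r12 : Int) (r21 : Int) (r22 : Int) (out : List (Int × Int)) : Prop := out = cut_ranges_alt r11 r12 r21 r22
instance (r11 : Int) (r12 : Int) (r21 : Int) (r22 : Int) (out : List (Int × Int)) : Decidable (Spec_cut_ranges r11 r12 r21 r22 out) := by unfold Spec_cut_ranges; infer_instance

-- ===== CLAIM (what is proved, stated in full; the proofs are below) =====
def Claim_equal_cut_ranges : Prop := ∀ (r11 : Int) (r12 : Int) (r21 : Int) (r22 : Int), Dom_cut_ranges r11 r12 r21 r22 → Pre_cut_ranges r11 r12 r21 r22 → Spec_cut_ranges r11 r12 r21 r22 (cut_ranges r11 r12 r21 r22)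

-- ===== LEMMAS AND PROOFS =====

-- An insertion sort on fst-then-snd leaves a list whose firsts strictly increase unchanged.
theorem sorted2_eq_self_of_fst_lt (L : List (Int × Int))
    (h : L.Pairwise (fun p q => p.1 < q.1)) :
    PySem.List.sorted2 L Prod.fst Prod.snd false = L := by
  induction L using List.reverseRecOn with
  | nil => rfl
  | append_singleton L x ih =>
    have hL : L.Pairwise (fun p q => p.1 < q.1) := (List.pairwise_append.mp h).1
    have hx : ∀ y ∈ L, y.1 < x.1 := by
      intro y hy; exact (List.pairwise_append.mp h).2.2 y hy x (by simp)
    have hstep : PySem.List.sorted2 (L ++ [x]) Prod.fst Prod.snd false =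
        PySem.List.insertBy
          (fun a b => decide (a.1 < b.1) || !decide (b.1 < a.1) && decide (a.2 < b.2)) x
          (PySem.List.sorted2 L Prod.fst Prod.snd false) := by
      simp [PySem.List.sorted2, List.foldl_append]
    rw [hstep, ih hL, PySem.List.insertBy_of_forall_not_before]
    intro y hy
    have := hx y hy
    simp only [Bool.or_eq_false_iff, Bool.and_eq_false_iff, decide_eq_false_iff_not]
    constructor
    · omega
    · left; simp only [Bool.not_eq_false', decide_eq_true_eq]; omega

theorem sorted2_ofList_eq_self (L : List (Int × Int))
    (h : L.Pairwise (fun p q => p.1 < q.1)) :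
    PySem.List.sorted2 (PySem.Set.ofList L) Prod.fst Prod.snd false = L := by
  have hnd : L.Nodup := by
    refine List.Pairwise.imp ?_ h
    intro a b hpq he
    rw [he] at hpq; omega
  rw [PySem.Set.ofList_eq_self_of_nodup L hnd, sorted2_eq_self_of_fst_lt L h]

-- ===== VERDICT (by name: the statement is the Claim_ definition above) =====
set_option maxHeartbeats 2000000 in
theorem cut_ranges_spec : Claim_equal_cut_ranges := by
  intro r11 r12 r21 r22 _ hpre
  obtain ⟨h1, h2⟩ := hpre
  unfold Spec_cut_ranges
  rcases le_or_gt (r21) (r11) with hA | hA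
  · rcases le_or_gt (r22) (r11) with hB | hB
    · -- r21 ≤ r22 ≤ r11 ≤ r12
      have hpts : PySem.List.sorted [r11, r12, r21, r22] (fun x => x) false
          = [r21, r22, r11, r12] := by
        apply PySem.List.sorted_id_eq_of_perm_of_pairwise
        · show ([r21, r22] ++ [r11, r12]).Perm ([r11, r12] ++ [r21, r22])
          exact List.perm_append_comm
        · simp [List.pairwise_cons]; omega
      have ha : min (max r21 r11) r12 = r11 := by omega
      have hb : min (max r22 r11) r12 = r11 := by omega
      simp only [cut_ranges, cut_ranges_alt, hpts, ha, hb]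
      simp only [List.zip, List.zipWith, List.tail, List.foldl, List.nil_append,
        List.cons_append, List.filter_cons, List.filter_nil, decide_eq_true_eq]
      split_ifs <;>
        first
          | rfl
          | (exfalso; omega)
          | (apply sorted2_ofList_eq_self; simp [List.pairwise_cons] <;> omega)
    · rcases le_or_gt (r22) (r12) with hC | hC
      · -- r21 ≤ r11 < r22 ≤ r12
        have hpts : PySem.List.sorted [r11, r12, r21, r22] (fun x => x) false
            = [r21, r11, r22, r12] := by
          apply PySem.List.sorted_id_eq_of_perm_of_pairwise
          · exact (List.Perm.swap r11 r21 [r22, r12]).trans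
              (List.Perm.cons r11
                (show ([r21, r22] ++ [r12]).Perm ([r12] ++ [r21, r22]) from
                  List.perm_append_comm))
          · simp [List.pairwise_cons]; omega
        have ha : min (max r21 r11) r12 = r11 := by omega
        have hb : min (max r22 r11) r12 = r22 := by omega
        simp only [cut_ranges, cut_ranges_alt, hpts, ha, hb]
        simp only [List.zip, List.zipWith, List.tail, List.foldl, List.nil_append,
          List.cons_append, List.filter_cons, List.filter_nil, decide_eq_true_eq]
        split_ifs <;>
          first
            | rfl
            | (exfalso; omega)
            | (apply sorted2_ofList_eq_self; simp [List.pairwise_cons] <;> omega)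
      · -- r21 ≤ r11 ≤ r12 < r22
        have hpts : PySem.List.sorted [r11, r12, r21, r22] (fun x => x) false
            = [r21, r11, r12, r22] := by
          apply PySem.List.sorted_id_eq_of_perm_of_pairwise
          · exact (List.Perm.swap r11 r21 [r12, r22]).trans
              (List.Perm.cons r11 (List.Perm.swap r12 r21 [r22]))
          · simp [List.pairwise_cons]; omega
        have ha : min (max r21 r11) r12 = r11 := by omega
        have hb : min (max r22 r11) r12 = r12 := by omega
        simp only [cut_ranges, cut_ranges_alt, hpts, ha, hb]
        simp only [List.zip, List.zipWith, List.tail, List.foldl, List.nil_append,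
          List.cons_append, List.filter_cons, List.filter_nil, decide_eq_true_eq]
        split_ifs <;>
          first
            | rfl
            | (exfalso; omega)
            | (apply sorted2_ofList_eq_self; simp [List.pairwise_cons] <;> omega)
  · rcases le_or_gt (r22) (r12) with hC | hC
    · -- r11 < r21 ≤ r22 ≤ r12
      have hpts : PySem.List.sorted [r11, r12, r21, r22] (fun x => x) false
          = [r11, r21, r22, r12] := by
        apply PySem.List.sorted_id_eq_of_perm_of_pairwise
        · exact List.Perm.cons r11
            (show ([r21, r22] ++ [r12]).Perm ([r12] ++ [r21, r22]) from
              List.perm_append_comm)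
        · simp [List.pairwise_cons]; omega
      have ha : min (max r21 r11) r12 = r21 := by omega
      have hb : min (max r22 r11) r12 = r22 := by omega
      simp only [cut_ranges, cut_ranges_alt, hpts, ha, hb]
      simp only [List.zip, List.zipWith, List.tail, List.foldl, List.nil_append,
        List.cons_append, List.filter_cons, List.filter_nil, decide_eq_true_eq]
      split_ifs <;>
        first
          | rfl
          | (exfalso; omega)
          | (apply sorted2_ofList_eq_self; simp [List.pairwise_cons] <;> omega)
    · rcases le_or_gt (r21) (r12) with hD | hD
      · -- r11 < r21 ≤ r12 < r22
        have hpts : PySem.List.sorted [r11, r12, r21, r22] (fun x => x) false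
            = [r11, r21, r12, r22] := by
          apply PySem.List.sorted_id_eq_of_perm_of_pairwise
          · exact List.Perm.cons r11 (List.Perm.swap r12 r21 [r22])
          · simp [List.pairwise_cons]; omega
        have ha : min (max r21 r11) r12 = r21 := by omega
        have hb : min (max r22 r11) r12 = r12 := by omega
        simp only [cut_ranges, cut_ranges_alt, hpts, ha, hb]
        simp only [List.zip, List.zipWith, List.tail, List.foldl, List.nil_append,
          List.cons_append, List.filter_cons, List.filter_nil, decide_eq_true_eq]
        split_ifs <;>
          first
            | rfl
            | (exfalso; omega)
            | (apply sorted2_ofList_eq_self; simp [List.pairwise_cons] <;> omega)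
      · -- r11 ≤ r12 < r21 ≤ r22
        have hpts : PySem.List.sorted [r11, r12, r21, r22] (fun x => x) false
            = [r11, r12, r21, r22] := by
          apply PySem.List.sorted_id_eq_of_perm_of_pairwise
          · exact List.Perm.refl _
          · simp [List.pairwise_cons]; omega
        have ha : min (max r21 r11) r12 = r12 := by omega
        have hb : min (max r22 r11) r12 = r12 := by omega
        simp only [cut_ranges, cut_ranges_alt, hpts, ha, hb]
        simp only [List.zip, List.zipWith, List.tail, List.foldl, List.nil_append,
          List.cons_append, List.filter_cons, List.filter_nil, decide_eq_true_eq]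
        split_ifs <;>
          first
            | rfl
            | (exfalso; omega)
            | (apply sorted2_ofList_eq_self; simp [List.pairwise_cons] <;> omega)
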